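-- pv_equiv track=rewrite | github.com/amanpoddar375/LeetCodePOD | 2522-Partition-String-into-Substring-With-Values-at-Most-K/2522-Partition-String-into-Substring-With-Values-at-Most-K.py | minimumPartition
-- ===== SOURCE A (Python) =====
-- def minimumPartition(s: str, k: int) -> int:
--     if k < 10:
--         return len(s) if k >= int(max(s)) else -1
--     digits = len(str(k))
--     count = 0
--     while s:
--         if s[:digits] <= str(k):
--             s = s[digits:]
--         else:
--             s = s[digits-1:]
--         count += 1
--     return count
-- ===== SOURCE B (Python) =====
-- def _cmp(a, b):
--     return -1 if a < b else (0 if a == b else 1)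
--
-- def minimumPartition(s: str, k: int) -> int:
--     if k < 10:
--         return len(s) if k >= int(max(s)) else -1
--     ks = str(k)
--     digits = len(ks)
--     count = 0
--     pos = 0   # length of the open chunk
--     cmp = 0   # open chunk vs ks[:pos]: -1 less, 0 equal, 1 greater
--     for ch in s:
--         if pos == 0:
--             count += 1
--             cmp = 0
--         if cmp == 0:
--             cmp = _cmp(ch, ks[pos])
--         pos += 1
--         if pos == digits:
--             if cmp > 0:
--                 count += 1
--                 pos = 1
--                 cmp = _cmp(ch, ks[0])
--             else:
--                 pos = 0
--     return count
-- ===== Notes on version B (the rewrite author's own statement) =====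
-- stated objective: faster
-- what changed: Replaces A's while-loop of repeated slicing (s[:digits], s[digits:] copy the whole remainder every iteration) and whole-block string comparisons against str(k) by a single char-by-char pass driving a small automaton (open-chunk length plus a -1/0/1 comparison state against the matching prefix of str(k)), with no slicing at all.
import Mathlib
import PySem

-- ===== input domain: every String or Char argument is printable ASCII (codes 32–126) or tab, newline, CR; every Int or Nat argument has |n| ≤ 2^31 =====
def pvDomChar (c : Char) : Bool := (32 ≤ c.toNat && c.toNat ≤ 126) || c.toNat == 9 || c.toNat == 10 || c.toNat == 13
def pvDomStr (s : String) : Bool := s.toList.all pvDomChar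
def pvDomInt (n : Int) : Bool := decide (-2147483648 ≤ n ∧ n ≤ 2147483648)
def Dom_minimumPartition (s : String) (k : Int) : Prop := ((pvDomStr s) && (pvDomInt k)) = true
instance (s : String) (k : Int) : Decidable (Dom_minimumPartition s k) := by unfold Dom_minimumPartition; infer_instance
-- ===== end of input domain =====

-- B replaces A's while-loop of repeated slicing and whole-block string comparisons against str(k)
-- by a single char-by-char pass driving a small automaton (open-chunk length + a -1/0/1 comparison
-- state against the matching prefix of str(k)); A's k < 10 guard line is kept as-is.

-- ===== PORT A =====
-- int(c) for a single digit char c: exact for '0'..'9' (on other chars Python raises ValueError; Pre_ excludes those inputs)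
def pvDigit (c : Char) : Int := (c.toNat : Int) - 48

-- Python string `<=`: code-point lexicographic comparison (exact)
def pvLexLe : List Char → List Char → Bool
  | [], _ => true
  | _ :: _, [] => false
  | a :: as, b :: bs => if a = b then pvLexLe as bs else decide (a < b)

-- the `while s:` loop of A; fuel = initial length of s (each iteration drops ≥ 1 char when k ≥ 10,
-- the only case reaching the loop, so the fuel guard never fires there).
-- s[:digits] / s[digits:] with 0 ≤ digits are List.take / List.drop (exact for nonnegative bounds).
def pvLoopA (kcs : List Char) (digits : Nat) : Nat → List Char → Int → Int
  | _, [], count => count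
  | 0, _ :: _, count => count
  | fuel+1, c :: cs, count =>
      if pvLexLe ((c :: cs).take digits) kcs
      then pvLoopA kcs digits fuel ((c :: cs).drop digits) (count+1)
      else pvLoopA kcs digits fuel ((c :: cs).drop (digits-1)) (count+1)

def minimumPartition (s : String) (k : Int) : Int :=
  if k < 10 then
    match PySem.List.max? s.toList (fun c => c) with
    | none => 0   -- Python: max('') raises ValueError; excluded by Pre_
    | some m => if pvDigit m ≤ k then PySem.Str.len s else -1
  else
    pvLoopA (PySem.Int.toChars k) (PySem.Int.toChars k).length s.toList.length s.toList 0

-- ===== PORT B =====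
-- _cmp(a, b) of Source B
def pvCmp3 (x y : Char) : Int := if x < y then -1 else if x = y then 0 else 1

-- one iteration of B's `for ch in s` loop; state = (count, pos, cmp)
def pvStepB (kcs : List Char) (digits : Int) (st : Int × Int × Int) (ch : Char) : Int × Int × Int :=
  let count := if st.2.1 = 0 then st.1 + 1 else st.1
  let cmp0 := if st.2.1 = 0 then 0 else st.2.2
  let cmp := if cmp0 = 0 then
      match PySem.List.pyGet? kcs st.2.1 with
      | some c2 => pvCmp3 ch c2
      | none => cmp0   -- unreachable: the loop keeps 0 ≤ pos < digits = len(ks), so ks[pos] never raises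
    else cmp0
  let pos := st.2.1 + 1
  if pos = digits then
    if cmp > 0 then
      (count + 1, 1,
        match PySem.List.pyGet? kcs 0 with
        | some c0 => pvCmp3 ch c0
        | none => 0)   -- unreachable: 2 ≤ digits = len(ks)
    else (count, 0, cmp)
  else (count, pos, cmp)

def minimumPartition_alt (s : String) (k : Int) : Int :=
  if k < 10 then
    match PySem.List.max? s.toList (fun c => c) with
    | none => 0   -- Python: max('') raises ValueError; excluded by Pre_
    | some m => if pvDigit m ≤ k then PySem.Str.len s else -1
  else
    (s.toList.foldl (pvStepB (PySem.Int.toChars k) ((PySem.Int.toChars k).length : Int)) (0, 0, 0)).1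

-- ===== PRECONDITION & SPEC =====
-- Pre_ is exactly the set of inputs on which the Python A returns normally: when k < 10, A raises
-- ValueError on empty s (max('')) and when max(s) is not a digit (int(max(s))); B raises there too.
def Pre_minimumPartition (s : String) (k : Int) : Prop :=
  10 ≤ k ∨ (s.toList ≠ [] ∧ s.toList.all (fun c => decide (c ≤ '9')) = true ∧
            s.toList.any (fun c => decide ('0' ≤ c)) = true)
instance (s : String) (k : Int) : Decidable (Pre_minimumPartition s k) := by
  unfold Pre_minimumPartition; infer_instance

def pvWitness_minimumPartition : String × Int := ("2468", 123)

def Spec_minimumPartition (s : String) (k : Int) (out : Int) : Prop := out = minimumPartition_alt s k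
instance (s : String) (k : Int) (out : Int) : Decidable (Spec_minimumPartition s k out) := by
  unfold Spec_minimumPartition; infer_instance

-- ===== CLAIM (what is proved, stated in full; the proofs are below) =====
def Claim_equal_minimumPartition : Prop := ∀ (s : String) (k : Int), Dom_minimumPartition s k → Pre_minimumPartition s k → Spec_minimumPartition s k (minimumPartition s k)

-- ===== LEMMAS AND PROOFS =====

-- --- str(k) has at least two characters for k ≥ 10 ---
lemma pvToDigitsCore_eq : ∀ (f n : Nat) (acc : List Char), 0 < n → n < f →
    Nat.toDigitsCore 10 f n acc = ((Nat.digits 10 n).map Nat.digitChar).reverse ++ acc := by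
  intro f
  induction f with
  | zero => intro n acc h1 h2; omega
  | succ f ih =>
    intro n acc h1 h2
    rw [Nat.toDigitsCore]
    by_cases hdiv : n / 10 = 0
    · simp only [hdiv]
      rw [Nat.digits_def' (by norm_num : (1:Nat) < 10) h1, hdiv, Nat.digits_zero]
      simp
    · simp only [if_neg hdiv]
      have h10 : 0 < n / 10 := Nat.pos_of_ne_zero hdiv
      have hlt : n / 10 < f := by
        have : n / 10 < n := Nat.div_lt_self h1 (by norm_num)
        omega
      rw [ih (n / 10) _ h10 hlt, Nat.digits_def' (by norm_num : (1:Nat) < 10) h1]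
      simp

lemma pvKlen {k : Int} (hk : 10 ≤ k) : 2 ≤ (PySem.Int.toChars k).length := by
  have hknn : ¬ k < 0 := by omega
  have hpos : 0 < k.toNat := by omega
  have hchars : PySem.Int.toChars k = ((Nat.digits 10 k.toNat).map Nat.digitChar).reverse := by
    simp only [PySem.Int.toChars, if_neg hknn, Nat.toDigits]
    rw [pvToDigitsCore_eq (k.toNat + 1) k.toNat [] hpos (by omega)]
    simp
  have hlen : (PySem.Int.toChars k).length = Nat.log 10 k.toNat + 1 := by
    rw [hchars]
    simp [Nat.digits_len 10 k.toNat (by norm_num) (by omega)]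
  have hlog1 : 1 ≤ Nat.log 10 k.toNat := by
    by_contra h
    have h0 : Nat.log 10 k.toNat = 0 := by omega
    have := Nat.lt_pow_succ_log_self (b := 10) (by norm_num) k.toNat
    rw [h0] at this
    simp at this; omega
  rw [hlen]; omega

-- --- three-way lexicographic comparison and its relation to pvLexLe ---
def pvLexCmp : List Char → List Char → Int
  | [], [] => 0
  | [], _ :: _ => -1
  | _ :: _, [] => 1
  | a :: as, b :: bs => if pvCmp3 a b = 0 then pvLexCmp as bs else pvCmp3 a b

lemma pvCmp3_zero_iff (x y : Char) : pvCmp3 x y = 0 ↔ x = y := by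
  unfold pvCmp3
  split_ifs with h1 h2
  · constructor
    · intro h; exact absurd h (by norm_num)
    · intro h; subst h; exact absurd h1 (lt_irrefl x)
  · simp [h2]
  · constructor
    · intro h; exact absurd h (by norm_num)
    · intro h; exact absurd h h2

lemma pvCmp3_trich (x y : Char) : pvCmp3 x y = -1 ∨ pvCmp3 x y = 0 ∨ pvCmp3 x y = 1 := by
  unfold pvCmp3; split_ifs <;> simp

lemma pvLexCmp_trich : ∀ (a b : List Char),
    pvLexCmp a b = -1 ∨ pvLexCmp a b = 0 ∨ pvLexCmp a b = 1 := by
  intro a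
  induction a with
  | nil => intro b; cases b <;> simp [pvLexCmp]
  | cons x as ih =>
    intro b
    cases b with
    | nil => simp [pvLexCmp]
    | cons y bs =>
      by_cases h : pvCmp3 x y = 0
      · simpa [pvLexCmp, h] using ih bs
      · simpa [pvLexCmp, h] using pvCmp3_trich x y

lemma pvLexLe_iff_cmp : ∀ (a b : List Char), pvLexLe a b = true ↔ pvLexCmp a b ≠ 1 := by
  intro a
  induction a with
  | nil => intro b; cases b <;> simp [pvLexLe, pvLexCmp] <;> norm_num
  | cons x as ih =>
    intro b
    cases b with
    | nil => simp [pvLexLe, pvLexCmp]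
    | cons y bs =>
      by_cases hxy : x = y
      · subst hxy
        have h0 : pvCmp3 x x = 0 := (pvCmp3_zero_iff x x).mpr rfl
        simpa [pvLexLe, pvLexCmp, h0] using ih bs
      · have h0 : pvCmp3 x y ≠ 0 := fun h => hxy ((pvCmp3_zero_iff x y).mp h)
        by_cases hlt : x < y
        · have : pvCmp3 x y = -1 := by simp [pvCmp3, hlt]
          simp [pvLexLe, pvLexCmp, hxy, hlt, h0, this]
        · have : pvCmp3 x y = 1 := by simp [pvCmp3, hlt, hxy]
          simp [pvLexLe, pvLexCmp, hxy, hlt, h0, this]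

lemma pvLexCmp_snoc : ∀ (a b : List Char) (x y : Char), a.length = b.length →
    pvLexCmp (a ++ [x]) (b ++ [y]) =
      if pvLexCmp a b = 0 then pvCmp3 x y else pvLexCmp a b := by
  intro a
  induction a with
  | nil =>
    intro b x y hl
    cases b with
    | nil => by_cases h : pvCmp3 x y = 0 <;> simp [pvLexCmp, h]
    | cons _ _ => simp at hl
  | cons c as ih =>
    intro b x y hl
    cases b with
    | nil => simp at hl
    | cons d bs =>
      simp only [List.length_cons, Nat.add_right_cancel_iff] at hl
      by_cases h : pvCmp3 c d = 0
      · simpa [pvLexCmp, h] using ih bs x y hl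
      · simp [pvLexCmp, h]

lemma pvLexCmp_single (x y : Char) : pvLexCmp [x] [y] = pvCmp3 x y := by
  by_cases h : pvCmp3 x y = 0 <;> simp [pvLexCmp, h]

-- --- the count accumulator and fuel of A's loop ---
lemma pvLoopA_count (kcs : List Char) (D : Nat) : ∀ (fuel : Nat) (cs : List Char) (count : Int),
    pvLoopA kcs D fuel cs count = count + pvLoopA kcs D fuel cs 0 := by
  intro fuel
  induction fuel with
  | zero => intro cs count; cases cs <;> simp [pvLoopA]
  | succ f ih =>
    intro cs count
    cases cs with
    | nil => simp [pvLoopA]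
    | cons c t =>
      rw [pvLoopA, pvLoopA]
      split_ifs with h
      · rw [ih _ (count + 1), ih _ (0 + 1)]; ring
      · rw [ih _ (count + 1), ih _ (0 + 1)]; ring

lemma pvLoopA_fuel (kcs : List Char) (D : Nat) (hD : 2 ≤ D) :
    ∀ (fuel fuel' : Nat) (cs : List Char), cs.length ≤ fuel → cs.length ≤ fuel' →
    pvLoopA kcs D fuel cs 0 = pvLoopA kcs D fuel' cs 0 := by
  intro fuel
  induction fuel with
  | zero =>
    intro fuel' cs h _
    have : cs = [] := List.eq_nil_of_length_eq_zero (by omega)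
    subst this; cases fuel' <;> simp [pvLoopA]
  | succ f ih =>
    intro fuel' cs h h'
    cases cs with
    | nil => cases fuel' <;> simp [pvLoopA]
    | cons c t =>
      cases fuel' with
      | zero => simp at h'
      | succ f' =>
        rw [pvLoopA, pvLoopA]
        simp only [List.length_cons] at h h'
        split_ifs with hx
        · rw [pvLoopA_count _ _ f, pvLoopA_count _ _ f']
          rw [ih f' ((c :: t).drop D) (by simp <;> omega) (by simp <;> omega)]
        · rw [pvLoopA_count _ _ f, pvLoopA_count _ _ f']
          rw [ih f' ((c :: t).drop (D - 1)) (by simp <;> omega) (by simp <;> omega)]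

-- canonical chunk count of A's loop
def pvA0 (kcs : List Char) (D : Nat) (cs : List Char) : Int :=
  pvLoopA kcs D cs.length cs 0

-- a nonempty list shorter than D is one chunk (both branches drop everything)
lemma pvA0_short {kcs : List Char} {D : Nat} (hD : 2 ≤ D)
    (p : List Char) (hp : p ≠ []) (hpD : p.length ≤ D - 1) :
    pvA0 kcs D p = 1 := by
  cases p with
  | nil => exact absurd rfl hp
  | cons c t =>
    rw [pvA0, List.length_cons, pvLoopA]
    have hsh : (c :: t).length ≤ D - 1 := hpD
    have hd1 : (c :: t).drop (D - 1) = [] := List.drop_eq_nil_of_le hsh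
    have hdD : (c :: t).drop D = [] := List.drop_eq_nil_of_le (by omega)
    split_ifs with hx
    · rw [hdD]; cases t.length <;> simp [pvLoopA]
    · rw [hd1]; cases t.length <;> simp [pvLoopA]

-- A's first chunk on p ++ d :: r is p (length D-1) when p ++ [d] compares greater than str(k)
lemma pvA0_closeGt {kcs : List Char} {D : Nat} (hD : 2 ≤ D) (hlen : kcs.length = D)
    (p : List Char) (d : Char) (r : List Char) (hpl : p.length = D - 1)
    (hgt : pvLexLe (p ++ [d]) kcs = false) :
    pvA0 kcs D (p ++ d :: r) = 1 + pvA0 kcs D (d :: r) := by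
  obtain ⟨c0, t0, rfl⟩ : ∃ c0 t0, p = c0 :: t0 := by
    cases p with
    | nil => simp at hpl; omega
    | cons a b => exact ⟨a, b, rfl⟩
  have hcons : (c0 :: t0) ++ d :: r = c0 :: (t0 ++ d :: r) := by simp
  rw [pvA0, hcons, List.length_cons, pvLoopA]
  have htake : (c0 :: (t0 ++ d :: r)).take D = (c0 :: t0) ++ [d] := by
    rw [← hcons, List.take_append, List.take_of_length_le (by omega), hpl]
    have h1 : D - (D - 1) = 1 := by omega
    rw [h1]
    simp
  rw [htake]
  rw [if_neg (by simpa using hgt)]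
  have hdrop : (c0 :: (t0 ++ d :: r)).drop (D - 1) = d :: r := by
    rw [← hcons, List.drop_append, List.drop_eq_nil_of_le (by omega), hpl]
    simp
  rw [hdrop, pvLoopA_count]
  rw [pvLoopA_fuel kcs D hD _ (d :: r).length (d :: r) (by simp <;> omega) le_rfl]
  rw [pvA0]; ring

-- A's first chunk on p ++ d :: r is p ++ [d] (length D) when it compares ≤ str(k)
lemma pvA0_closeLe {kcs : List Char} {D : Nat} (hD : 2 ≤ D) (hlen : kcs.length = D)
    (p : List Char) (d : Char) (r : List Char) (hpl : p.length = D - 1)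
    (hle : pvLexLe (p ++ [d]) kcs = true) :
    pvA0 kcs D (p ++ d :: r) = 1 + pvA0 kcs D r := by
  obtain ⟨c0, t0, rfl⟩ : ∃ c0 t0, p = c0 :: t0 := by
    cases p with
    | nil => simp at hpl; omega
    | cons a b => exact ⟨a, b, rfl⟩
  have hcons : (c0 :: t0) ++ d :: r = c0 :: (t0 ++ d :: r) := by simp
  rw [pvA0, hcons, List.length_cons, pvLoopA]
  have htake : (c0 :: (t0 ++ d :: r)).take D = (c0 :: t0) ++ [d] := by
    rw [← hcons, List.take_append, List.take_of_length_le (by omega), hpl]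
    have h1 : D - (D - 1) = 1 := by omega
    rw [h1]
    simp
  rw [htake, if_pos hle]
  have hdrop : (c0 :: (t0 ++ d :: r)).drop D = r := by
    rw [← hcons, List.drop_append, List.drop_eq_nil_of_le (by omega), hpl]
    have h1 : D - (D - 1) = 1 := by omega
    rw [h1]
    simp
  rw [hdrop, pvLoopA_count]
  rw [pvLoopA_fuel kcs D hD _ r.length r (by simp <;> omega) le_rfl]
  rw [pvA0]; ring

-- B's comparison state for an open chunk p: p versus the matching prefix of str(k)
def pvCst (kcs p : List Char) : Int := pvLexCmp p (kcs.take p.length)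

lemma pvCst_snoc {kcs : List Char} {p : List Char} {c2 : Char}
    (hlt : p.length < kcs.length) (hget : kcs[p.length]? = some c2) (d : Char) :
    pvCst kcs (p ++ [d]) = if pvCst kcs p = 0 then pvCmp3 d c2 else pvCst kcs p := by
  unfold pvCst
  have htake : kcs.take (p ++ [d]).length = kcs.take p.length ++ [c2] := by
    rw [List.length_append, List.length_cons, List.length_nil, List.take_succ, hget]
    rfl
  rw [htake, pvLexCmp_snoc p (kcs.take p.length) d c2
    (by rw [List.length_take]; omega)]

-- the main invariant: B's fold equals A's chunk count, with or without an open chunk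
lemma pvAuxB {kcs : List Char} {D : Nat} (hD : 2 ≤ D) (hlen : kcs.length = D) :
    ∀ (r : List Char),
      (∀ (cnt c : Int),
        (r.foldl (pvStepB kcs (D : Int)) (cnt, 0, c)).1 = cnt + pvA0 kcs D r)
      ∧ (∀ (p : List Char) (cnt : Int), p ≠ [] → p.length ≤ D - 1 →
        (r.foldl (pvStepB kcs (D : Int)) (cnt, (p.length : Int), pvCst kcs p)).1 + 1
          = cnt + pvA0 kcs D (p ++ r)) := by
  have hk0 : ∃ c0, PySem.List.pyGet? kcs 0 = some c0 ∧ kcs.take 1 = [c0] := by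
    cases hcs : kcs with
    | nil => rw [hcs] at hlen; simp at hlen; omega
    | cons a t => exact ⟨a, by simp [PySem.List.pyGet?_natCast (a :: t) 0], by simp⟩
  obtain ⟨c0, hget0, htake1⟩ := hk0
  have hCd : ∀ d : Char, pvCst kcs [d] = pvCmp3 d c0 := by
    intro d
    unfold pvCst
    simp [htake1, pvLexCmp_single]
  intro r
  induction r with
  | nil =>
    constructor
    · intro cnt c; simp [pvA0, pvLoopA]
    · intro p cnt hp hpD
      simp only [List.foldl_nil]
      rw [List.append_nil, pvA0_short hD p hp hpD]
  | cons d r' ih =>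
    have hstep0 : ∀ (cnt c : Int),
        pvStepB kcs (D : Int) (cnt, 0, c) d = (cnt + 1, 1, pvCmp3 d c0) := by
      intro cnt c
      have hne : ¬ ((1 : Int) = (D : Int)) := by
        have : (2 : Int) ≤ (D : Int) := by exact_mod_cast hD
        omega
      simp [pvStepB, hget0, hne]
    constructor
    · -- no open chunk: the next char starts one
      intro cnt c
      rw [List.foldl_cons, hstep0 cnt c]
      have h1 := ih.2 [d] (cnt + 1) (by simp) (by simp only [List.length_singleton]; omega)
      rw [hCd d] at h1
      simp only [List.length_singleton, Nat.cast_one, List.singleton_append] at h1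
      omega
    · -- open chunk p (1 ≤ |p| ≤ D-1)
      intro p cnt hp hpD
      have hppos : 1 ≤ p.length := List.length_pos_of_ne_nil hp
      have hplt : p.length < kcs.length := by omega
      have hgetp : ∃ c2, kcs[p.length]? = some c2 ∧
          PySem.List.pyGet? kcs (p.length : Int) = some c2 := by
        refine ⟨kcs[p.length], List.getElem?_eq_getElem hplt, ?_⟩
        rw [PySem.List.pyGet?_natCast kcs p.length, List.getElem?_eq_getElem hplt]
      obtain ⟨c2, hgetp', hgetp⟩ := hgetp
      have hpne0 : ¬ ((p.length : Int) = 0) := by omega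
      have hcmp : (if pvCst kcs p = 0 then pvCmp3 d c2 else pvCst kcs p)
          = pvCst kcs (p ++ [d]) := (pvCst_snoc hplt hgetp' d).symm
      by_cases hDeq : p.length + 1 = D
      · have hDeqI : (p.length : Int) + 1 = (D : Int) := by exact_mod_cast hDeq
        have hCfull : pvCst kcs (p ++ [d]) = pvLexCmp (p ++ [d]) kcs := by
          unfold pvCst
          rw [List.take_of_length_le (by simp; omega)]
        by_cases hgt : pvCst kcs (p ++ [d]) > 0
        · -- the full chunk compares greater: A takes D-1 chars, B restarts the chunk at d
          have hone : pvLexCmp (p ++ [d]) kcs = 1 := by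
            rcases pvLexCmp_trich (p ++ [d]) kcs with h | h | h <;>
              rw [← hCfull] at h <;> omega
          have hlexf : pvLexLe (p ++ [d]) kcs = false := by
            rcases Bool.eq_false_or_eq_true (pvLexLe (p ++ [d]) kcs) with h | h
            · exact absurd hone ((pvLexLe_iff_cmp (p ++ [d]) kcs).mp h)
            · exact h
          have hstep : pvStepB kcs (D : Int) (cnt, (p.length : Int), pvCst kcs p) d
              = (cnt + 1, 1, pvCmp3 d c0) := by
            simp only [pvStepB, hgetp, if_neg hpne0, hcmp, hDeqI, if_pos rfl, if_true,
              if_pos hgt, hget0]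
          rw [List.foldl_cons, hstep]
          have h1 := ih.2 [d] (cnt + 1) (by simp) (by simp only [List.length_singleton]; omega)
          rw [hCd d] at h1
          simp only [List.length_singleton, Nat.cast_one, List.singleton_append] at h1
          rw [pvA0_closeGt hD hlen p d r' (by omega) hlexf]
          omega
        · -- the full chunk compares ≤ str(k): A takes D chars, B closes the chunk
          have hnotone : pvLexCmp (p ++ [d]) kcs ≠ 1 := by
            rcases pvLexCmp_trich (p ++ [d]) kcs with h | h | h <;>
              rw [← hCfull] at h <;> omega
          have hlext : pvLexLe (p ++ [d]) kcs = true :=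
            (pvLexLe_iff_cmp (p ++ [d]) kcs).mpr hnotone
          have hstep : pvStepB kcs (D : Int) (cnt, (p.length : Int), pvCst kcs p) d
              = (cnt, 0, pvCst kcs (p ++ [d])) := by
            simp only [pvStepB, hgetp, if_neg hpne0, hcmp, hDeqI, if_pos rfl, if_true,
              if_neg hgt]
          rw [List.foldl_cons, hstep]
          have h1 := ih.1 cnt (pvCst kcs (p ++ [d]))
          rw [pvA0_closeLe hD hlen p d r' (by omega) hlext]
          omega
      · -- the chunk is still short: B extends it by d
        have hDneI : ¬ ((p.length : Int) + 1 = (D : Int)) := by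
          intro h
          exact hDeq (by exact_mod_cast h)
        have hstep : pvStepB kcs (D : Int) (cnt, (p.length : Int), pvCst kcs p) d
            = (cnt, (p.length : Int) + 1, pvCst kcs (p ++ [d])) := by
          simp only [pvStepB, hgetp, if_neg hpne0, hcmp, if_neg hDneI]
        rw [List.foldl_cons, hstep]
        have h1 := ih.2 (p ++ [d]) cnt (by simp)
          (by simp only [List.length_append, List.length_singleton]; omega)
        have hlen' : ((p ++ [d]).length : Int) = (p.length : Int) + 1 := by
          simp
        rw [hlen'] at h1
        rw [List.append_assoc] at h1
        simpa using h1

-- ===== VERDICT (by name: the statement is the Claim_ definition above) =====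
theorem minimumPartition_spec : Claim_equal_minimumPartition := by
  intro s k _ _
  unfold Spec_minimumPartition minimumPartition minimumPartition_alt
  by_cases hk : k < 10
  · rw [if_pos hk, if_pos hk]
  · rw [if_neg hk, if_neg hk]
    have hk10 : 10 ≤ k := by omega
    have hD := pvKlen hk10
    have h := (pvAuxB hD rfl s.toList).1 0 0
    rw [h]
    simp [pvA0]
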